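-- pv_equiv track=rewrite | github.com/FeHuX0/AOIS | Lab1/src/operations/sign_magnitude_arithmetic.py | _fractional_decimal_digits
-- ===== SOURCE A (Python) =====
-- from typing import List, Tuple
--
-- def _fractional_decimal_digits(remainder: int, divisor: int, precision: int) -> str:
--     digits: List[str] = []
--     current = remainder
--     for _ in range(precision):
--         current *= 10
--         digit = 0
--         while current >= divisor:
--             current -= divisor
--             digit += 1
--         digits.append(str(digit))
--     return "".join(digits)
-- ===== SOURCE B (Python) =====
-- def _fractional_decimal_digits(remainder: int, divisor: int, precision: int) -> str:
--     if precision <= 0: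
--         return ""
--     CHUNK = 1000
--     parts = []
--     cur = remainder
--     left = precision
--     width = precision % CHUNK or CHUNK
--     while left > 0:
--         cur *= 10 ** width
--         q, cur = divmod(cur, divisor)
--         parts.append(str(q).zfill(width))
--         left -= width
--         width = CHUNK
--     return "".join(parts)
-- ===== Notes on version B (the rewrite author's own statement) =====
-- stated objective: faster
-- what changed: Replaces A's digit-at-a-time long division (an outer loop per digit with an inner repeated-subtraction loop computing each digit) by chunked division: one closed-form divmod of cur*10**width by the divisor plus one zero-filled str() per 1000-digit block, concatenated.
-- outside the precondition, e.g. on _fractional_decimal_digits(-3, 7, 2): A returns '00', B returns '-43'; on _fractional_decimal_digits(-100, -5, 1): A returns '0', B returns '200'; on _fractional_decimal_digits(-1, 0, 2): A returns '00', B raises ZeroDivisionError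
import Mathlib
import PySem

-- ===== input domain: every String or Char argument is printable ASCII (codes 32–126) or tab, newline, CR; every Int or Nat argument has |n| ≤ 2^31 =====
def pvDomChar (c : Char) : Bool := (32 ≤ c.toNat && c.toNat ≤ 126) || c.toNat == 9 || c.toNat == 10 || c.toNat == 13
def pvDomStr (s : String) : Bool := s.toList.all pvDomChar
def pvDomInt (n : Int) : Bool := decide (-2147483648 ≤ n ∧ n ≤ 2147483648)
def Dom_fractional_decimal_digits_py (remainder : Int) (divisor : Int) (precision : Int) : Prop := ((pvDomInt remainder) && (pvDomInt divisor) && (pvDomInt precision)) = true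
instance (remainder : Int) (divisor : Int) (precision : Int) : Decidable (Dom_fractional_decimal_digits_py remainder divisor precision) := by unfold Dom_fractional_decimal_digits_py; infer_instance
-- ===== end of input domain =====

-- B replaces A's digit-by-digit long division (an outer loop per digit with an inner
-- repeated-subtraction loop computing each digit) by chunked division: one closed-form
-- divmod and zero-filled str() per 1000-digit block (measured faster in a timing run).

-- ===== PORT A =====
-- the inner `while current >= divisor: current -= divisor; digit += 1` loop;
-- the `0 < divisor` conjunct is a totality guard only (Python loops forever there)
def pyA_while (divisor : Int) (current : Int) (digit : Int) : Int × Int :=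
  if h : 0 < divisor ∧ divisor ≤ current then
    pyA_while divisor (current - divisor) (digit + 1)
  else
    (current, digit)
termination_by current.toNat
decreasing_by omega

-- one iteration of A's `for _ in range(precision)` body over the state (digits, current)
def pyA_step (divisor : Int) (s : List String × Int) (_ : Int) : List String × Int :=
  let current := s.2 * 10
  let r := pyA_while divisor current 0
  (s.1 ++ [PySem.Int.toStr r.2], r.1)

def fractional_decimal_digits_py (remainder : Int) (divisor : Int) (precision : Int) : String :=
  let st := (PySem.List.pyRange 0 precision).foldl (pyA_step divisor) ([], remainder)
  PySem.Str.join "" st.1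

-- ===== PORT B =====
-- B's `while left > 0` chunk loop; each pass emits str(q).zfill(width) for
-- q, cur = divmod(cur * 10**width, divisor).  The `0 < width` conjunct is a totality
-- guard only (every call passes a positive width).
def pyB_go (divisor : Int) (cur : Int) (left : Int) (width : Int) (parts : List String) :
    List String :=
  if _h : 0 < left ∧ 0 < width then
    pyB_go divisor (PySem.Int.mod (cur * 10 ^ width.toNat) divisor) (left - width) 1000
      (parts ++
        [PySem.Str.zfill
          (PySem.Int.toStr (PySem.Int.floordiv (cur * 10 ^ width.toNat) divisor)) width])
  else parts
termination_by left.toNat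
decreasing_by omega

def fractional_decimal_digits_py_alt (remainder : Int) (divisor : Int) (precision : Int) : String :=
  if precision ≤ 0 then ""
  else
    PySem.Str.join ""
      (pyB_go divisor remainder precision
        (if PySem.Int.mod precision 1000 = 0 then 1000 else PySem.Int.mod precision 1000) [])

-- ===== PRECONDITION & SPEC =====
-- Pre_ admits every nonpositive precision (both programs return "" without touching the
-- divisor) and otherwise restricts to the natural long-division domain (a remainder ≥ 0 still
-- to be divided by a divisor > 0): outside it Python A either loops forever (e.g.
-- remainder ≥ 0 with divisor ≤ 0) or returns an all-zeros string that is an accidental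
-- artefact of its subtraction loop never firing (remainder < 0), where B's floored quotient
-- is an equally unspecified value (or, for divisor = 0, a ZeroDivisionError).
def Pre_fractional_decimal_digits_py (remainder : Int) (divisor : Int) (precision : Int) : Prop :=
  precision ≤ 0 ∨ (0 ≤ remainder ∧ 0 < divisor)
instance (remainder : Int) (divisor : Int) (precision : Int) : Decidable (Pre_fractional_decimal_digits_py remainder divisor precision) := by unfold Pre_fractional_decimal_digits_py; infer_instance

def pvWitness_fractional_decimal_digits_py : Int × Int × Int := (7, 3, 4)

def Spec_fractional_decimal_digits_py (remainder : Int) (divisor : Int) (precision : Int) (out : String) : Prop := out = fractional_decimal_digits_py_alt remainder divisor precision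
instance (remainder : Int) (divisor : Int) (precision : Int) (out : String) : Decidable (Spec_fractional_decimal_digits_py remainder divisor precision out) := by unfold Spec_fractional_decimal_digits_py; infer_instance

-- ===== CLAIM (what is proved, stated in full; the proofs are below) =====
def Claim_equal_fractional_decimal_digits_py : Prop := ∀ (remainder : Int) (divisor : Int) (precision : Int), Dom_fractional_decimal_digits_py remainder divisor precision → Pre_fractional_decimal_digits_py remainder divisor precision → Spec_fractional_decimal_digits_py remainder divisor precision (fractional_decimal_digits_py remainder divisor precision)

-- ===== LEMMAS AND PROOFS =====

-- A's inner subtraction loop IS Python divmod on the natural domain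
theorem pyA_while_eq (d : Int) (hd : 0 < d) :
    ∀ (cur : Int), 0 ≤ cur → ∀ (g : Int),
      pyA_while d cur g = (PySem.Int.mod cur d, g + PySem.Int.floordiv cur d) := by
  have main : ∀ (m : Nat) (cur : Int), cur.toNat = m → 0 ≤ cur → ∀ (g : Int),
      pyA_while d cur g = (PySem.Int.mod cur d, g + PySem.Int.floordiv cur d) := by
    intro m
    induction m using Nat.strong_induction_on with
    | _ m ih =>
      intro cur hm hc g
      rw [pyA_while]
      by_cases hcd : d ≤ cur
      · rw [dif_pos ⟨hd, hcd⟩]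
        rw [ih (cur - d).toNat (by omega) (cur - d) rfl (by omega) (g + 1)]
        rw [PySem.Int.mod_eq_emod_of_pos hd, PySem.Int.floordiv_eq_ediv_of_pos hd,
          PySem.Int.mod_eq_emod_of_pos hd, PySem.Int.floordiv_eq_ediv_of_pos hd]
        have hdvd : (cur - d) / d = cur / d + (-1) := by
          have h := Int.add_mul_ediv_right cur (-1) (ne_of_gt hd)
          have he : cur + (-1) * d = cur - d := by ring
          rwa [he] at h
        have hmod : (cur - d) % d = cur % d := by
          have h := Int.add_mul_emod_self_left (a := cur) (b := d) (c := (-1))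
          have he : cur + d * (-1) = cur - d := by ring
          rwa [he] at h
        rw [hdvd, hmod]
        simp only [Prod.mk.injEq, true_and]
        ring
      · rw [dif_neg (by tauto)]
        have hlt : cur < d := lt_of_not_ge hcd
        rw [PySem.Int.mod_eq_emod_of_pos hd, PySem.Int.floordiv_eq_ediv_of_pos hd]
        rw [Int.emod_eq_of_lt hc hlt, Int.ediv_eq_zero_of_lt hc hlt]
        simp only [Prod.mk.injEq, true_and]
        ring
  intro cur hc g
  exact main cur.toNat cur rfl hc g

-- decimal representation of a natural number, most significant digit first
def decRep (n : Nat) : List Char :=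
  if _h : n < 10 then [Nat.digitChar n]
  else decRep (n / 10) ++ [Nat.digitChar (n % 10)]
termination_by n
decreasing_by omega

theorem toDigitsCore_eq_decRep :
    ∀ (f n : Nat), n < f → ∀ (acc : List Char),
      Nat.toDigitsCore 10 f n acc = decRep n ++ acc := by
  have main : ∀ (n f : Nat), n < f → ∀ (acc : List Char),
      Nat.toDigitsCore 10 f n acc = decRep n ++ acc := by
    intro n
    induction n using Nat.strong_induction_on with
    | _ n ih =>
      intro f hf acc
      match f, hf with
      | f' + 1, hf =>
        rw [Nat.toDigitsCore]
        by_cases h0 : n / 10 = 0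
        · have hn10 : n < 10 := by omega
          rw [decRep, dif_pos hn10]
          simp [h0, Nat.mod_eq_of_lt hn10]
        · have hge : 10 ≤ n := by omega
          have hdiv : n / 10 < n := Nat.div_lt_self (by omega) (by omega)
          simp only [h0, if_false]
          rw [ih (n / 10) (by omega) f' (by omega) (Nat.digitChar (n % 10) :: acc)]
          have hrep : decRep n = decRep (n / 10) ++ [Nat.digitChar (n % 10)] := by
            conv_lhs => rw [decRep]
            rw [dif_neg (by omega)]
          rw [hrep]
          simp
  exact fun f n h acc => main n f h acc

theorem toChars_natCast (n : Nat) : PySem.Int.toChars (n : Int) = decRep n := by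
  have h1 : ¬ ((n : Int) < 0) := by simp
  rw [PySem.Int.toChars, if_neg h1]
  simp only [Int.toNat_natCast]
  rw [Nat.toDigits, toDigitsCore_eq_decRep (n + 1) n (by omega) []]
  simp

theorem decRep_head (n : Nat) : ∃ d t, d < 10 ∧ decRep n = Nat.digitChar d :: t := by
  induction n using Nat.strong_induction_on with
  | _ n ih =>
    by_cases h : n < 10
    · exact ⟨n, [], h, by rw [decRep, dif_pos h]⟩
    · obtain ⟨d, t, hd, ht⟩ := ih (n / 10) (by omega)
      exact ⟨d, t ++ [Nat.digitChar (n % 10)], hd, by rw [decRep, dif_neg h, ht]; simp⟩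

theorem decRep_ne_nil (n : Nat) : decRep n ≠ [] := by
  obtain ⟨d, t, _, h⟩ := decRep_head n
  simp [h]

theorem decRep_append (a b : Nat) (ha : a ≠ 0) (hb : b < 10) :
    decRep (10 * a + b) = decRep a ++ [Nat.digitChar b] := by
  rw [decRep, dif_neg (by omega)]
  have h1 : (10 * a + b) / 10 = a := by omega
  have h2 : (10 * a + b) % 10 = b := by omega
  rw [h1, h2]

theorem decRep_lt (b : Nat) (hb : b < 10) : decRep b = [Nat.digitChar b] := by
  rw [decRep, dif_pos hb]

-- zero-padding of a digit string (no sign): zfill is plain left-padding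
def padTo (k : Nat) (cs : List Char) : List Char :=
  List.replicate (k - cs.length) '0' ++ cs

theorem zfill_decRep (n : Nat) (w : Int) :
    PySem.Chars.zfill (decRep n) w = padTo w.toNat (decRep n) := by
  obtain ⟨d, t, hd, ht⟩ := decRep_head n
  have hsign : ∀ e : Nat, e < 10 → ¬ (Nat.digitChar e = '+' ∨ Nat.digitChar e = '-') := by decide
  by_cases hw : w ≤ ((decRep n).length : Int)
  · rw [PySem.Chars.zfill.eq_def, if_pos hw, padTo]
    have h0 : w.toNat - (decRep n).length = 0 := by omega
    rw [h0]
    simp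
  · rw [ht] at hw ⊢
    rw [PySem.Chars.zfill.eq_def, if_neg hw]
    simp only [hsign d hd, if_false]
    rw [padTo, ← ht]

theorem pad_append_digit (k Q dgt : Nat) (hk : 1 ≤ k) (hd : dgt < 10) :
    padTo k (decRep Q) ++ [Nat.digitChar dgt] = padTo (k + 1) (decRep (10 * Q + dgt)) := by
  have hpad : ∀ (m : Nat) (x : Char), 1 ≤ m → padTo m ['0'] ++ [x] = padTo (m + 1) [x] := by
    intro m x hm
    simp only [padTo, List.length_cons, List.length_nil]
    have e1 : m + 1 - (0 + 1) = (m - (0 + 1)) + 1 := by omega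
    rw [e1, List.replicate_succ']
  by_cases hQ : Q = 0
  · rw [hQ]
    have hz : decRep (10 * 0 + dgt) = [Nat.digitChar dgt] := by
      rw [Nat.mul_zero, Nat.zero_add, decRep_lt _ hd]
    have hz0 : decRep 0 = ['0'] := by
      rw [decRep_lt 0 (by omega)]
      decide
    rw [hz, hz0]
    exact hpad k _ hk
  · rw [decRep_append Q _ hQ hd, padTo, padTo]
    have e : k + 1 - (decRep Q ++ [Nat.digitChar dgt]).length = k - (decRep Q).length := by
      simp only [List.length_append, List.length_cons, List.length_nil]
      omega
    rw [e]
    simp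

-- the loop invariant: after k ≥ 1 iterations of A's outer loop started from ([], R),
-- the joined digit strings are the zero-padded decimal of (R·10^k)/D and current is (R·10^k)%D
theorem loopA_inv (R D : Nat) (hD : 0 < D) :
    ∀ (k : Nat), 1 ≤ k →
      (((List.range k).foldl (fun (s : List String × Int) (km : Nat) => pyA_step (D : Int) s (km : Int)) ([], (R : Int))).1.map
          String.toList).flatten = padTo k (decRep (R * 10 ^ k / D)) ∧
      ((List.range k).foldl (fun (s : List String × Int) (km : Nat) => pyA_step (D : Int) s (km : Int)) ([], (R : Int))).2 =
        ((R * 10 ^ k % D : Nat) : Int) := by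
  have hDi : (0 : Int) < (D : Int) := by exact_mod_cast hD
  intro k hk
  induction k, hk using Nat.le_induction with
  | base =>
    have hc : ((R : Int) * 10) = ((R * 10 : Nat) : Int) := by push_cast; ring
    have hw := pyA_while_eq (D : Int) hDi ((R * 10 : Nat) : Int) (by positivity) 0
    simp only [List.range_one, List.foldl_cons, List.foldl_nil, pyA_step]
    rw [hc, hw]
    simp only [PySem.Int.mod_natCast, PySem.Int.floordiv_natCast, zero_add]
    constructor
    · simp only [List.nil_append, List.map_cons, List.map_nil, List.flatten_cons,
        List.flatten_nil, PySem.Int.toList_toStr, toChars_natCast, List.append_nil, pow_one]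
      have hlen : 1 ≤ (decRep (R * 10 / D)).length :=
        List.length_pos_iff.mpr (decRep_ne_nil _)
      rw [padTo, Nat.sub_eq_zero_of_le hlen]
      simp
    · rw [pow_one]
  | succ k hk ih =>
    obtain ⟨ih1, ih2⟩ := ih
    rw [List.range_succ, List.foldl_append, List.foldl_cons, List.foldl_nil]
    set st := (List.range k).foldl
        (fun (s : List String × Int) (km : Nat) => pyA_step (D : Int) s (km : Int))
        ([], (R : Int)) with hst
    set C := R * 10 ^ k % D with hC
    set Q := R * 10 ^ k / D with hQdef
    have hCD : C < D := Nat.mod_lt _ hD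
    have hc : ((C : Int) * 10) = ((C * 10 : Nat) : Int) := by push_cast; ring
    have hw := pyA_while_eq (D : Int) hDi ((C * 10 : Nat) : Int) (by positivity) 0
    have hstep : pyA_step (D : Int) st (k : Int) =
        (st.1 ++ [PySem.Int.toStr ((C * 10 / D : Nat) : Int)], ((C * 10 % D : Nat) : Int)) := by
      rw [pyA_step, ih2, hc, hw, PySem.Int.mod_natCast, PySem.Int.floordiv_natCast, zero_add]
    rw [hstep]
    have hdm : D * Q + C = R * 10 ^ k := Nat.div_add_mod _ _
    have h1 : R * 10 ^ (k + 1) = C * 10 + D * (10 * Q) := by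
      rw [pow_succ, ← mul_assoc, ← hdm]; ring
    have hdig : C * 10 / D < 10 := Nat.div_lt_of_lt_mul (by omega)
    have hq : R * 10 ^ (k + 1) / D = 10 * Q + C * 10 / D := by
      rw [h1, Nat.add_mul_div_left _ _ hD]; omega
    have hcm : R * 10 ^ (k + 1) % D = C * 10 % D := by
      rw [h1, Nat.add_mul_mod_self_left]
    refine ⟨?_, by rw [hcm]⟩
    simp only [List.map_append, List.flatten_append, ih1, List.map_cons, List.map_nil,
      List.flatten_cons, List.flatten_nil, PySem.Int.toList_toStr, toChars_natCast,
      List.append_nil, hq, decRep_lt _ hdig]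
    exact pad_append_digit k Q _ hk hdig

theorem join_nil_flatten (l : List (List Char)) : PySem.Chars.join [] l = l.flatten := by
  rw [PySem.Chars.join]
  induction l with
  | nil => rfl
  | cons a t ih => cases t <;> simp_all [List.intercalate, List.intersperse]

theorem pyRange_nonpos (p : Int) (hp : p ≤ 0) : PySem.List.pyRange 0 p = [] := by
  simp [PySem.List.pyRange, show ¬ (0 : Int) < p by omega]

theorem pad_append_block (j : Nat) (hj : 1 ≤ j) :
    ∀ (k Q d : Nat), 1 ≤ k → d < 10 ^ j →
      padTo (k + j) (decRep (10 ^ j * Q + d)) = padTo k (decRep Q) ++ padTo j (decRep d) := by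
  induction j, hj using Nat.le_induction with
  | base =>
    intro k Q d hk hd
    have hd' : d < 10 := by simpa using hd
    rw [pow_one, ← pad_append_digit k Q d hk hd', decRep_lt d hd']
    have : padTo 1 [Nat.digitChar d] = [Nat.digitChar d] := by
      simp [padTo]
    rw [this]
  | succ j hj ih =>
    intro k Q d hk hd
    have hdq : d / 10 < 10 ^ j := by
      rw [pow_succ] at hd
      omega
    have hdr : d % 10 < 10 := by omega
    have e : 10 ^ (j + 1) * Q + d = 10 * (10 ^ j * Q + d / 10) + d % 10 := by
      conv_lhs => rw [pow_succ, show d = 10 * (d / 10) + d % 10 from by omega]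
      ring
    have e2 : k + (j + 1) = (k + j) + 1 := by omega
    rw [e2, e, ← pad_append_digit (k + j) (10 ^ j * Q + d / 10) (d % 10) (by omega) hdr,
      ih k Q (d / 10) hk hdq]
    rw [List.append_assoc]
    congr 1
    have hblk : padTo (j + 1) (decRep d) = padTo j (decRep (d / 10)) ++ [Nat.digitChar (d % 10)] := by
      conv_lhs => rw [show d = 10 * (d / 10) + d % 10 from by omega]
      exact (pad_append_digit j (d / 10) (d % 10) hj hdr).symm
    rw [hblk]

-- B's chunk loop on the all-full-chunks tail: with current value c < D and 1000·m digits
-- left it appends exactly the zero-padded decimal of c·10^(1000·m)/D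
set_option maxRecDepth 8192 in
theorem go_block (D : Nat) (hD : 0 < D) :
    ∀ (m : Nat), 1 ≤ m → ∀ (c : Nat), c < D → ∀ (parts : List String),
      ((pyB_go (D : Int) (c : Int) ((1000 * m : Nat) : Int) 1000 parts).map String.toList).flatten
        = (parts.map String.toList).flatten ++
            padTo (1000 * m) (decRep (c * 10 ^ (1000 * m) / D)) := by
  intro m hm
  induction m, hm using Nat.le_induction with
  | base =>
    intro c hc parts
    rw [pyB_go, dif_pos ⟨by norm_num, by norm_num⟩]
    have htn : ((1000 : Int)).toNat = 1000 := rfl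
    have hc2 : (c : Int) * 10 ^ ((1000 : Int)).toNat = ((c * 10 ^ 1000 : Nat) : Int) := by
      rw [htn]; push_cast; try ring
    rw [hc2, PySem.Int.mod_natCast, PySem.Int.floordiv_natCast]
    have hleft : ((1000 * 1 : Nat) : Int) - 1000 = 0 := by push_cast; try ring
    rw [hleft, pyB_go, dif_neg (by norm_num)]
    simp only [List.map_append, List.flatten_append, List.map_cons, List.map_nil,
      List.flatten_cons, List.flatten_nil, List.append_nil,
      PySem.Str.toList_zfill, PySem.Int.toList_toStr, toChars_natCast, zfill_decRep, htn]
  | succ m hm ih =>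
    intro c hc parts
    rw [pyB_go, dif_pos ⟨by positivity, by norm_num⟩]
    have htn : ((1000 : Int)).toNat = 1000 := rfl
    have hc2 : (c : Int) * 10 ^ ((1000 : Int)).toNat = ((c * 10 ^ 1000 : Nat) : Int) := by
      rw [htn]; push_cast; try ring
    rw [hc2, PySem.Int.mod_natCast, PySem.Int.floordiv_natCast]
    have hleft : ((1000 * (m + 1) : Nat) : Int) - 1000 = ((1000 * m : Nat) : Int) := by
      push_cast; try ring
    rw [hleft, ih (c * 10 ^ 1000 % D) (Nat.mod_lt _ hD) _]
    set c1 := c * 10 ^ 1000 % D with hc1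
    set q1 := c * 10 ^ 1000 / D with hq1
    have hdm : D * q1 + c1 = c * 10 ^ 1000 := Nat.div_add_mod _ _
    have hc1D : c1 < D := Nat.mod_lt _ hD
    have hX : 0 < 10 ^ (1000 * m) := pow_pos (by norm_num) _
    have hdlt : c1 * 10 ^ (1000 * m) / D < 10 ^ (1000 * m) := by
      exact Nat.div_lt_of_lt_mul (mul_lt_mul_of_pos_right hc1D hX)
    have e1 : c * 10 ^ (1000 * (m + 1)) =
        c1 * 10 ^ (1000 * m) + D * (q1 * 10 ^ (1000 * m)) := by
      have hsplit : 1000 * (m + 1) = 1000 + 1000 * m := by ring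
      rw [hsplit, pow_add, ← mul_assoc, ← hdm]; ring
    have e2 : c * 10 ^ (1000 * (m + 1)) / D =
        10 ^ (1000 * m) * q1 + c1 * 10 ^ (1000 * m) / D := by
      rw [e1, Nat.add_mul_div_left _ _ hD]; ring
    simp only [List.map_append, List.flatten_append, List.map_cons, List.map_nil,
      List.flatten_cons, List.flatten_nil, List.append_nil,
      PySem.Str.toList_zfill, PySem.Int.toList_toStr, toChars_natCast, zfill_decRep, htn,
      List.append_assoc]
    rw [e2, show 1000 * (m + 1) = 1000 + 1000 * m from by ring,
      pad_append_block (1000 * m) (by omega) 1000 q1 _ (by omega) hdlt]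

theorem A_chars (R D : Nat) (hD : 0 < D) (n : Nat) (hn : 1 ≤ n) :
    (fractional_decimal_digits_py (R : Int) (D : Int) (n : Int)).toList
      = padTo n (decRep (R * 10 ^ n / D)) := by
  obtain ⟨h1, _h2⟩ := loopA_inv R D hD n hn
  rw [fractional_decimal_digits_py, PySem.List.pyRange_zero_natCast, List.foldl_map]
  rw [PySem.Str.toList_join]
  have hsep : ("" : String).toList = [] := rfl
  rw [hsep, join_nil_flatten, h1]

set_option maxRecDepth 8192 in
theorem B_chars (R D : Nat) (hD : 0 < D) (n : Nat) (hn : 1 ≤ n) :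
    (fractional_decimal_digits_py_alt (R : Int) (D : Int) (n : Int)).toList
      = padTo n (decRep (R * 10 ^ n / D)) := by
  have hnp : ¬ ((n : Int) ≤ 0) := by exact_mod_cast not_le.mpr (by exact_mod_cast hn : (0 : Int) < (n : Int))
  rw [fractional_decimal_digits_py_alt, if_neg hnp]
  have hmod : PySem.Int.mod (n : Int) 1000 = ((n % 1000 : Nat) : Int) := by
    exact_mod_cast PySem.Int.mod_natCast n 1000
  set F := if n % 1000 = 0 then 1000 else n % 1000 with hF
  have hwidth : (if PySem.Int.mod (n : Int) 1000 = 0 then (1000 : Int)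
      else PySem.Int.mod (n : Int) 1000) = (F : Int) := by
    by_cases h0 : n % 1000 = 0
    · rw [hF]; simp only [hmod, h0]; norm_num
    · have h0' : ¬ (((n % 1000 : Nat) : Int) = 0) := by exact_mod_cast h0
      rw [hF]; simp only [hmod]; rw [if_neg h0', if_neg h0]
  rw [hwidth]
  have hF1 : 1 ≤ F := by rw [hF]; split <;> omega
  have hm : n = F + 1000 * ((n - F) / 1000) := by rw [hF]; split <;> omega
  set m := (n - F) / 1000 with hmdef
  rw [pyB_go, dif_pos ⟨by exact_mod_cast (by omega : 0 < n), by exact_mod_cast hF1⟩]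
  have htn : ((F : Int)).toNat = F := Int.toNat_natCast F
  have hc2 : (R : Int) * 10 ^ ((F : Int)).toNat = ((R * 10 ^ F : Nat) : Int) := by
    rw [htn]; push_cast; ring
  rw [hc2, PySem.Int.mod_natCast, PySem.Int.floordiv_natCast]
  have hleft : (n : Int) - (F : Int) = ((1000 * m : Nat) : Int) := by push_cast; omega
  rw [hleft]
  set c1 := R * 10 ^ F % D with hc1
  set q1 := R * 10 ^ F / D with hq1
  by_cases hm0 : m = 0
  · rw [hm0, show ((1000 * 0 : Nat) : Int) = 0 from by norm_num, pyB_go,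
      dif_neg (by norm_num)]
    have hnF : n = F := by omega
    rw [PySem.Str.toList_join]
    have hsep : ("" : String).toList = [] := rfl
    rw [hsep, join_nil_flatten]
    simp only [List.map_cons, List.map_nil, List.flatten_cons, List.flatten_nil,
      List.append_nil, List.nil_append, PySem.Str.toList_zfill, PySem.Int.toList_toStr,
      toChars_natCast, zfill_decRep, htn]
    rw [hnF]
  · have hm1 : 1 ≤ m := by omega
    rw [PySem.Str.toList_join]
    have hsep : ("" : String).toList = [] := rfl
    rw [hsep, join_nil_flatten, go_block D hD m hm1 c1 (Nat.mod_lt _ hD) _]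
    have hdm : D * q1 + c1 = R * 10 ^ F := Nat.div_add_mod _ _
    have hc1D : c1 < D := Nat.mod_lt _ hD
    have hX : 0 < 10 ^ (1000 * m) := pow_pos (by norm_num) _
    have hdlt : c1 * 10 ^ (1000 * m) / D < 10 ^ (1000 * m) := by
      exact Nat.div_lt_of_lt_mul (mul_lt_mul_of_pos_right hc1D hX)
    have e1 : R * 10 ^ n = c1 * 10 ^ (1000 * m) + D * (q1 * 10 ^ (1000 * m)) := by
      conv_lhs => rw [hm]
      rw [pow_add, ← mul_assoc, ← hdm]; ring
    have e2 : R * 10 ^ n / D = 10 ^ (1000 * m) * q1 + c1 * 10 ^ (1000 * m) / D := by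
      rw [e1, Nat.add_mul_div_left _ _ hD]; ring
    simp only [List.map_cons, List.map_nil, List.flatten_cons, List.flatten_nil,
      List.append_nil, List.nil_append, PySem.Str.toList_zfill, PySem.Int.toList_toStr,
      toChars_natCast, zfill_decRep, htn]
    rw [e2, show n = F + 1000 * m from hm]
    exact (pad_append_block (1000 * m) (by omega) F q1 _ hF1 hdlt).symm

-- ===== VERDICT (by name: the statement is the Claim_ definition above) =====
theorem fractional_decimal_digits_py_spec : Claim_equal_fractional_decimal_digits_py := by
  intro r d p _hdom hpre
  unfold Spec_fractional_decimal_digits_py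
  rw [← String.toList_inj]
  by_cases hp : p ≤ 0
  · rw [fractional_decimal_digits_py, fractional_decimal_digits_py_alt, if_pos hp,
      pyRange_nonpos p hp]
    simp [PySem.Str.toList_join]
  · obtain ⟨hr, hd⟩ := hpre.resolve_left hp
    rw [show r = ((r.toNat : Nat) : Int) from by omega,
      show d = ((d.toNat : Nat) : Int) from by omega,
      show p = ((p.toNat : Nat) : Int) from by omega]
    rw [A_chars r.toNat d.toNat (by omega) p.toNat (by omega),
      B_chars r.toNat d.toNat (by omega) p.toNat (by omega)]
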